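-- pv_equiv track=rewrite | github.com/TayyaabZ/Portfolio | Disk Scheduling Visualizer/algorithms.py | clook
-- ===== SOURCE A (Python) =====
-- def clook(requests: list[int], head: int, disk_size: int, direction: str) -> list[int]:
--     """
--     Circular LOOK (C-LOOK)
--
--     Similar to C-SCAN, but head does NOT go to disk edges.
--     After servicing last request in current direction, jumps directly to
--     the first request on the opposite side.
--
--     Args:
--         requests: List of track numbers to service
--         head: Initial head position
--         disk_size: Total number of tracks (unused, but kept for consistent API)
--         direction: "left" (toward 0) or "right" (toward disk_size-1)
--
--     Returns:
--         Seek sequence starting with head (no forced edge visits, jump between last and first request)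
--     """
--     # Start with initial head position
--     seek_sequence = [head]
--
--     # Service any requests at current head position immediately
--     at_head = [r for r in requests if r == head]
--
--     # Separate remaining requests into left and right of head (strict inequality)
--     left = sorted([r for r in requests if r < head])                 # Ascending (for wrap-around)
--     right = sorted([r for r in requests if r > head])                # Ascending
--
--     # Add requests at head position
--     seek_sequence.extend(at_head)
--
--     if direction == "right":
--         # Move right: service right requests
--         seek_sequence.extend(right)
--
--         # Jump directly to smallest request (first in left side when sorted ascending)
--         # No edge visits - continue servicing from lowest track
--         seek_sequence.extend(left)
--
--     else:  # direction == "left"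
--         # Move left: service left requests (descending order)
--         seek_sequence.extend(sorted(left, reverse=True))
--
--         # Jump directly to largest request on right side
--         # No edge visits - continue servicing from highest track going down
--         seek_sequence.extend(sorted(right, reverse=True))
--
--     return seek_sequence
-- ===== SOURCE B (Python) =====
-- def clook(requests: list[int], head: int, disk_size: int, direction: str) -> list[int]:
--     # Greedy simulation: repeatedly service the nearest pending request in the
--     # travel direction (wrapping C-LOOK style when none remains ahead).
--     remaining = list(requests)
--     seq = [head]
--     pos = head
--     while remaining:
--         if direction == "right":
--             ahead = [r for r in remaining if r >= pos]
--             nxt = min(ahead) if ahead else min(remaining)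
--         else:
--             ahead = [r for r in remaining if r <= pos]
--             nxt = max(ahead) if ahead else max(remaining)
--         remaining.remove(nxt)
--         seq.append(nxt)
--         pos = nxt
--     return seq
-- ===== Notes on version B (the rewrite author's own statement) =====
-- stated objective: alternative
-- what changed: A partitions requests around the head with filtered comprehensions and concatenates pre-sorted groups; B never sorts: it simulates the head movement, repeatedly selecting (min/max scan) the nearest pending request in the travel direction and wrapping when none remains ahead.
import Mathlib
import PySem

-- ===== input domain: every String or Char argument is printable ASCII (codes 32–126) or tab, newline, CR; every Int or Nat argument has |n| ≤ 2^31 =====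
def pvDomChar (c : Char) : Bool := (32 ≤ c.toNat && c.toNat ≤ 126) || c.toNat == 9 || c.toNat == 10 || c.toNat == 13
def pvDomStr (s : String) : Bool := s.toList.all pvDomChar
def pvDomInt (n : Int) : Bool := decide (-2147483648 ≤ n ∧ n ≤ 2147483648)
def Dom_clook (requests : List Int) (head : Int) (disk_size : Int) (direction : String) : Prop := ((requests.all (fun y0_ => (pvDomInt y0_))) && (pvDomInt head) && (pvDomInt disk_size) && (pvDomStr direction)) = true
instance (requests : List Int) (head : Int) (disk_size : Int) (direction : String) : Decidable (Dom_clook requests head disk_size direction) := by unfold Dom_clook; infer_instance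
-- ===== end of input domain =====

-- B replaces A's filter-and-sort construction with a greedy head-movement
-- simulation: repeatedly service the nearest pending request in the travel
-- direction, wrapping when none remains ahead (objective: alternative, not faster).

-- ===== PORT A =====
def clook (requests : List Int) (head : Int) (disk_size : Int) (direction : String) : List Int :=
  let seek_sequence : List Int := [head]
  let at_head := requests.filter (fun r => r == head)
  let left := PySem.List.sorted (requests.filter (fun r => decide (r < head))) (fun x => x)
  let right := PySem.List.sorted (requests.filter (fun r => decide (head < r))) (fun x => x)
  let seek_sequence := seek_sequence ++ at_head
  if direction == "right" then
    (seek_sequence ++ right) ++ left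
  else
    (seek_sequence ++ PySem.List.sorted left (fun x => x) true) ++ PySem.List.sorted right (fun x => x) true

-- ===== PORT B =====
-- Source B's choice of the next request to service: the nearest pending request in
-- the travel direction, or the wrap-around target if none lies ahead.
def clookNext (direction : String) (rem : List Int) (pos : Int) : Int :=
  if direction == "right" then
    let ahead := rem.filter (fun r => decide (pos ≤ r))
    if !ahead.isEmpty then (PySem.List.min? ahead (fun x => x)).getD 0
    else (PySem.List.min? rem (fun x => x)).getD 0
  else
    let ahead := rem.filter (fun r => decide (r ≤ pos))
    if !ahead.isEmpty then (PySem.List.max? ahead (fun x => x)).getD 0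
    else (PySem.List.max? rem (fun x => x)).getD 0

-- used by clookLoop's termination proof
theorem clookNext_mem (direction : String) (rem : List Int) (pos : Int) (h : rem ≠ []) :
    clookNext direction rem pos ∈ rem := by
  unfold clookNext
  split
  · by_cases hA : (rem.filter (fun r => decide (pos ≤ r))).isEmpty
    · rw [if_neg (by simp [hA])]
      obtain ⟨m, hm⟩ : ∃ m, PySem.List.min? rem (fun x => x) = some m := by
        cases hmm : PySem.List.min? rem (fun x => x) with
        | none => exact absurd ((PySem.List.min?_eq_none_iff _ _).mp hmm) h
        | some m => exact ⟨m, rfl⟩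
      simp only [hm, Option.getD_some]
      exact PySem.List.min?_mem hm
    · rw [if_pos (by simp [hA])]
      obtain ⟨m, hm⟩ : ∃ m, PySem.List.min? (rem.filter (fun r => decide (pos ≤ r))) (fun x => x) = some m := by
        cases hmm : PySem.List.min? (rem.filter (fun r => decide (pos ≤ r))) (fun x => x) with
        | none => exact absurd ((PySem.List.min?_eq_none_iff _ _).mp hmm) (fun hnil => hA (by simp [hnil]))
        | some m => exact ⟨m, rfl⟩
      simp only [hm, Option.getD_some]
      exact (List.mem_filter.mp (PySem.List.min?_mem hm)).1
  · by_cases hA : (rem.filter (fun r => decide (r ≤ pos))).isEmpty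
    · rw [if_neg (by simp [hA])]
      obtain ⟨m, hm⟩ : ∃ m, PySem.List.max? rem (fun x => x) = some m := by
        cases hmm : PySem.List.max? rem (fun x => x) with
        | none => exact absurd ((PySem.List.max?_eq_none_iff _ _).mp hmm) h
        | some m => exact ⟨m, rfl⟩
      simp only [hm, Option.getD_some]
      exact PySem.List.max?_mem hm
    · rw [if_pos (by simp [hA])]
      obtain ⟨m, hm⟩ : ∃ m, PySem.List.max? (rem.filter (fun r => decide (r ≤ pos))) (fun x => x) = some m := by
        cases hmm : PySem.List.max? (rem.filter (fun r => decide (r ≤ pos))) (fun x => x) with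
        | none => exact absurd ((PySem.List.max?_eq_none_iff _ _).mp hmm) (fun hnil => hA (by simp [hnil]))
        | some m => exact ⟨m, rfl⟩
      simp only [hm, Option.getD_some]
      exact (List.mem_filter.mp (PySem.List.max?_mem hm)).1

-- Source B's while loop: service requests one at a time until none remain.
def clookLoop (direction : String) (rem : List Int) (pos : Int) : List Int :=
  if _h : rem = [] then []
  else
    let nxt := clookNext direction rem pos
    nxt :: clookLoop direction (rem.erase nxt) nxt
termination_by rem.length
decreasing_by
  have hmem := clookNext_mem direction rem pos _h
  have h1 := List.length_erase_of_mem hmem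
  have h2 : 0 < rem.length := List.length_pos_of_mem hmem
  omega

def clook_alt (requests : List Int) (head : Int) (disk_size : Int) (direction : String) : List Int :=
  head :: clookLoop direction requests head

-- ===== PRECONDITION & SPEC =====
def Spec_clook (requests : List Int) (head : Int) (disk_size : Int) (direction : String) (out : List Int) : Prop := out = clook_alt requests head disk_size direction
instance (requests : List Int) (head : Int) (disk_size : Int) (direction : String) (out : List Int) : Decidable (Spec_clook requests head disk_size direction out) := by unfold Spec_clook; infer_instance

-- ===== CLAIM (what is proved, stated in full; the proofs are below) =====
def Claim_equal_clook : Prop := ∀ (requests : List Int) (head : Int) (disk_size : Int) (direction : String), Dom_clook requests head disk_size direction → Spec_clook requests head disk_size direction (clook requests head disk_size direction)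

-- ===== LEMMAS AND PROOFS =====

-- two sorted (by id) Int lists with the same multiset are equal (ascending / descending)
theorem asc_ext (l₁ l₂ : List Int) (hp : l₁.Perm l₂)
    (h1 : l₁.Pairwise (fun a b => a ≤ b)) (h2 : l₂.Pairwise (fun a b => a ≤ b)) : l₁ = l₂ :=
  PySem.List.eq_of_perm_of_pairwise_le_of_injective (fun x : Int => x) (fun _ _ h => h) hp h1 h2

theorem desc_ext (l₁ l₂ : List Int) (hp : l₁.Perm l₂)
    (h1 : l₁.Pairwise (fun a b => b ≤ a)) (h2 : l₂.Pairwise (fun a b => b ≤ a)) : l₁ = l₂ :=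
  PySem.List.eq_of_perm_of_pairwise_le_of_injective (fun x : Int => -x) neg_injective hp
    (h1.imp (fun h => by simpa using neg_le_neg h)) (h2.imp (fun h => by simpa using neg_le_neg h))

-- selection step: pulling a minimal (resp. maximal) element off the front of a sort
theorem asc_cons_min (l : List Int) (x : Int) (hx : x ∈ l) (hmin : ∀ y ∈ l, x ≤ y) :
    PySem.List.sorted l (fun a => a) = x :: PySem.List.sorted (l.erase x) (fun a => a) := by
  apply asc_ext
  · exact (PySem.List.sorted_perm l (fun a => a) false).trans
      ((List.perm_cons_erase hx).trans
        ((PySem.List.sorted_perm (l.erase x) (fun a => a) false).symm.cons x))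
  · exact PySem.List.sorted_pairwise l (fun a => a)
  · exact List.pairwise_cons.mpr ⟨fun y hy => hmin y (List.mem_of_mem_erase
      ((PySem.List.mem_sorted _ _ _ _).mp hy)), PySem.List.sorted_pairwise (l.erase x) (fun a => a)⟩

theorem desc_cons_max (l : List Int) (x : Int) (hx : x ∈ l) (hmax : ∀ y ∈ l, y ≤ x) :
    PySem.List.sorted l (fun a => a) true = x :: PySem.List.sorted (l.erase x) (fun a => a) true := by
  apply desc_ext
  · exact (PySem.List.sorted_perm l (fun a => a) true).trans
      ((List.perm_cons_erase hx).trans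
        ((PySem.List.sorted_perm (l.erase x) (fun a => a) true).symm.cons x))
  · exact PySem.List.sorted_pairwise_rev l (fun a => a)
  · exact List.pairwise_cons.mpr ⟨fun y hy => hmax y (List.mem_of_mem_erase
      ((PySem.List.mem_sorted _ _ _ _).mp hy)), PySem.List.sorted_pairwise_rev (l.erase x) (fun a => a)⟩

-- erasing an element the filter rejects does not change the filter
theorem filter_erase_of_neg (p : Int → Bool) (l : List Int) (a : Int) (ha : p a = false) :
    (l.erase a).filter p = l.filter p := by
  induction l with
  | nil => simp
  | cons x t ih =>
    by_cases hx : x = a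
    · subst hx; simp [List.erase_cons_head, List.filter_cons, ha]
    · rw [List.erase_cons_tail (by simpa using hx)]
      simp [List.filter_cons, ih]

-- erase commutes with filter when the erased element passes the filter
theorem filter_erase_of_pos (p : Int → Bool) (l : List Int) (a : Int) (ha : p a = true) :
    (l.erase a).filter p = (l.filter p).erase a := by
  induction l with
  | nil => simp
  | cons x t ih =>
    by_cases hx : x = a
    · subst hx; simp [List.erase_cons_head, List.filter_cons, ha]
    · have hxa : ¬(x == a) = true := by simp [hx]
      rw [List.erase_cons_tail hxa]
      by_cases hp : p x
      · simp [List.filter_cons, hp, ih, List.erase_cons_tail, hxa]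
      · simp [List.filter_cons, hp, ih]

-- one unfolding of the loop on a non-empty remaining list
theorem clookLoop_step (direction : String) (rem : List Int) (pos : Int) (hrem : rem ≠ []) :
    clookLoop direction rem pos =
      clookNext direction rem pos ::
        clookLoop direction (rem.erase (clookNext direction rem pos)) (clookNext direction rem pos) := by
  rw [clookLoop, dif_neg hrem]

-- multiset split of a one-sided filter into the head-valued and strict parts
theorem filter_le_perm (l : List Int) (h : Int) :
    (l.filter (fun r => decide (h ≤ r))).Perm
      (l.filter (fun r => r == h) ++ l.filter (fun r => decide (h < r))) := by
  induction l with
  | nil => simp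
  | cons x t ih =>
    by_cases h1 : x = h
    · subst h1; simpa [List.filter_cons] using ih.cons x
    · by_cases h2 : h < x
      · have hne : (x == h) = false := by simpa using h1
        simp only [List.filter_cons, hne, decide_eq_true_eq, if_pos (le_of_lt h2), if_pos h2,
          cond_false, cond_true]
        exact (ih.cons x).trans List.perm_middle.symm
      · have hlt : ¬ h ≤ x := fun hc => h1 (le_antisymm (by omega) hc)
        have hne : (x == h) = false := by simpa using h1
        simpa [List.filter_cons, hlt, h2, hne] using ih

theorem filter_ge_perm (l : List Int) (h : Int) :
    (l.filter (fun r => decide (r ≤ h))).Perm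
      (l.filter (fun r => r == h) ++ l.filter (fun r => decide (r < h))) := by
  induction l with
  | nil => simp
  | cons x t ih =>
    by_cases h1 : x = h
    · subst h1; simpa [List.filter_cons] using ih.cons x
    · by_cases h2 : x < h
      · have hne : (x == h) = false := by simpa using h1
        simp only [List.filter_cons, hne, decide_eq_true_eq, if_pos (le_of_lt h2), if_pos h2,
          cond_false, cond_true]
        exact (ih.cons x).trans List.perm_middle.symm
      · have hlt : ¬ x ≤ h := fun hc => h1 (le_antisymm hc (by omega))
        have hne : (x == h) = false := by simpa using h1
        simpa [List.filter_cons, hlt, h2, hne] using ih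

-- the right-direction loop produces: ascending run at/after pos, then the wrapped ascending run
theorem loop_right (n : ℕ) : ∀ (direction : String) (rem : List Int) (pos : Int),
    rem.length ≤ n → (direction == "right") = true →
    clookLoop direction rem pos =
      PySem.List.sorted (rem.filter (fun r => decide (pos ≤ r))) (fun a => a) ++
      PySem.List.sorted (rem.filter (fun r => decide (r < pos))) (fun a => a) := by
  induction n with
  | zero =>
    intro direction rem pos hlen _
    have : rem = [] := List.length_eq_zero_iff.mp (Nat.le_zero.mp hlen)
    subst this; rw [clookLoop]; simp [PySem.List.sorted_eq_nil_iff]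
  | succ n ih =>
    intro direction rem pos hlen hdir
    by_cases hrem : rem = []
    · subst hrem; rw [clookLoop]; simp [PySem.List.sorted_eq_nil_iff]
    · have hnxt : clookNext direction rem pos =
          (if !(rem.filter (fun r => decide (pos ≤ r))).isEmpty
           then (PySem.List.min? (rem.filter (fun r => decide (pos ≤ r))) (fun x => x)).getD 0
           else (PySem.List.min? rem (fun x => x)).getD 0) := by
        unfold clookNext; rw [if_pos hdir]
      by_cases hA : (rem.filter (fun r => decide (pos ≤ r))).isEmpty
      · -- wrap-around: nothing at or after pos
        have hAnil : rem.filter (fun r => decide (pos ≤ r)) = [] := List.isEmpty_iff.mp hA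
        have hall : ∀ y ∈ rem, y < pos := by
          intro y hy
          by_contra hc
          have hmemf : y ∈ rem.filter (fun r => decide (pos ≤ r)) :=
            List.mem_filter.mpr ⟨hy, by simpa using hc⟩
          simp [hAnil] at hmemf
        obtain ⟨m, hm⟩ : ∃ m, PySem.List.min? rem (fun x => x) = some m := by
          cases hmm : PySem.List.min? rem (fun x => x) with
          | none => exact absurd ((PySem.List.min?_eq_none_iff _ _).mp hmm) hrem
          | some m => exact ⟨m, rfl⟩
        have hmem : m ∈ rem := PySem.List.min?_mem hm
        have hmin : ∀ y ∈ rem, m ≤ y := fun y hy => PySem.List.min?_isMin hm y hy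
        have hnxt' : clookNext direction rem pos = m := by
          rw [hnxt, if_neg (by simp [hA]), hm, Option.getD_some]
        rw [clookLoop_step direction rem pos hrem, hnxt']
        have hfe : (rem.erase m).filter (fun r => decide (m ≤ r)) = rem.erase m :=
          List.filter_eq_self.mpr (fun y hy => by
            simpa using hmin y (List.mem_of_mem_erase hy))
        have hfn : (rem.erase m).filter (fun r => decide (r < m)) = [] :=
          List.filter_eq_nil_iff.mpr (fun y hy => by
            simpa using hmin y (List.mem_of_mem_erase hy))
        have hlen' : (rem.erase m).length ≤ n := by
          have h1 := List.length_erase_of_mem hmem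
          have h2 := List.length_pos_of_mem hmem
          omega
        rw [ih direction (rem.erase m) m hlen' hdir, hfe, hfn]
        have hfr : rem.filter (fun r => decide (r < pos)) = rem :=
          List.filter_eq_self.mpr (fun y hy => by simpa using hall y hy)
        rw [hAnil, hfr]
        have hnil : (PySem.List.sorted ([] : List Int) (fun a => a)) = [] := rfl
        simp [asc_cons_min rem m hmem hmin, hnil]
      · -- there is a request at or after pos: take the nearest one
        obtain ⟨m, hm⟩ : ∃ m, PySem.List.min? (rem.filter (fun r => decide (pos ≤ r))) (fun x => x) = some m := by
          cases hmm : PySem.List.min? (rem.filter (fun r => decide (pos ≤ r))) (fun x => x) with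
          | none => exact absurd ((PySem.List.min?_eq_none_iff _ _).mp hmm) (fun hnil => hA (by simp [hnil]))
          | some m => exact ⟨m, rfl⟩
        have hmemA : m ∈ rem.filter (fun r => decide (pos ≤ r)) := PySem.List.min?_mem hm
        have hmem : m ∈ rem := (List.mem_filter.mp hmemA).1
        have hposm : pos ≤ m := by simpa using (List.mem_filter.mp hmemA).2
        have hminA : ∀ y ∈ rem, pos ≤ y → m ≤ y := fun y hy hpy =>
          PySem.List.min?_isMin hm y (List.mem_filter.mpr ⟨hy, by simpa using hpy⟩)
        have hnxt' : clookNext direction rem pos = m := by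
          rw [hnxt, if_pos (by simp [hA]), hm, Option.getD_some]
        rw [clookLoop_step direction rem pos hrem, hnxt']
        have hlen' : (rem.erase m).length ≤ n := by
          have h1 := List.length_erase_of_mem hmem
          have h2 := List.length_pos_of_mem hmem
          omega
        rw [ih direction (rem.erase m) m hlen' hdir]
        have hcong1 : ∀ x ∈ rem.erase m, (decide (m ≤ x)) = (decide (pos ≤ x)) := by
          intro x hx
          have hxr := List.mem_of_mem_erase hx
          by_cases hp : pos ≤ x
          · simp [hp, hminA x hxr hp]
          · have hq : ¬ m ≤ x := by omega
            simp [hp, hq]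
        have hf1 : (rem.erase m).filter (fun r => decide (m ≤ r)) =
            (rem.filter (fun r => decide (pos ≤ r))).erase m := by
          rw [List.filter_congr hcong1, filter_erase_of_pos _ _ _ (by simpa using hposm)]
        have hcong2 : ∀ x ∈ rem.erase m, (decide (x < m)) = (decide (x < pos)) := by
          intro x hx
          have hxr := List.mem_of_mem_erase hx
          by_cases hp : pos ≤ x
          · have hq := hminA x hxr hp
            simp only [decide_eq_decide]
            omega
          · simp only [decide_eq_decide]
            omega
        have hf2 : (rem.erase m).filter (fun r => decide (r < m)) =
            rem.filter (fun r => decide (r < pos)) := by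
          rw [List.filter_congr hcong2]
          exact filter_erase_of_neg _ _ _ (by simp only [decide_eq_false_iff_not]; omega)
        rw [hf1, hf2,
          asc_cons_min (rem.filter (fun r => decide (pos ≤ r))) m hmemA
            (fun y hy => PySem.List.min?_isMin hm y hy)]
        simp

-- the non-right loop produces: descending run at/before pos, then the wrapped descending run
theorem loop_left (n : ℕ) : ∀ (direction : String) (rem : List Int) (pos : Int),
    rem.length ≤ n → (direction == "right") = false →
    clookLoop direction rem pos =
      PySem.List.sorted (rem.filter (fun r => decide (r ≤ pos))) (fun a => a) true ++
      PySem.List.sorted (rem.filter (fun r => decide (pos < r))) (fun a => a) true := by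
  induction n with
  | zero =>
    intro direction rem pos hlen _
    have : rem = [] := List.length_eq_zero_iff.mp (Nat.le_zero.mp hlen)
    subst this; rw [clookLoop]; simp [PySem.List.sorted_eq_nil_iff]
  | succ n ih =>
    intro direction rem pos hlen hdir
    by_cases hrem : rem = []
    · subst hrem; rw [clookLoop]; simp [PySem.List.sorted_eq_nil_iff]
    · have hnxt : clookNext direction rem pos =
          (if !(rem.filter (fun r => decide (r ≤ pos))).isEmpty
           then (PySem.List.max? (rem.filter (fun r => decide (r ≤ pos))) (fun x => x)).getD 0
           else (PySem.List.max? rem (fun x => x)).getD 0) := by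
        unfold clookNext; rw [if_neg (by simp [hdir])]
      by_cases hA : (rem.filter (fun r => decide (r ≤ pos))).isEmpty
      · have hAnil : rem.filter (fun r => decide (r ≤ pos)) = [] := List.isEmpty_iff.mp hA
        have hall : ∀ y ∈ rem, pos < y := by
          intro y hy
          by_contra hc
          have hmemf : y ∈ rem.filter (fun r => decide (r ≤ pos)) :=
            List.mem_filter.mpr ⟨hy, by simpa using hc⟩
          simp [hAnil] at hmemf
        obtain ⟨m, hm⟩ : ∃ m, PySem.List.max? rem (fun x => x) = some m := by
          cases hmm : PySem.List.max? rem (fun x => x) with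
          | none => exact absurd ((PySem.List.max?_eq_none_iff _ _).mp hmm) hrem
          | some m => exact ⟨m, rfl⟩
        have hmem : m ∈ rem := PySem.List.max?_mem hm
        have hmax : ∀ y ∈ rem, y ≤ m := fun y hy => PySem.List.max?_isMax hm y hy
        have hnxt' : clookNext direction rem pos = m := by
          rw [hnxt, if_neg (by simp [hA]), hm, Option.getD_some]
        rw [clookLoop_step direction rem pos hrem, hnxt']
        have hfe : (rem.erase m).filter (fun r => decide (r ≤ m)) = rem.erase m :=
          List.filter_eq_self.mpr (fun y hy => by
            simpa using hmax y (List.mem_of_mem_erase hy))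
        have hfn : (rem.erase m).filter (fun r => decide (m < r)) = [] :=
          List.filter_eq_nil_iff.mpr (fun y hy => by
            simpa using hmax y (List.mem_of_mem_erase hy))
        have hlen' : (rem.erase m).length ≤ n := by
          have h1 := List.length_erase_of_mem hmem
          have h2 := List.length_pos_of_mem hmem
          omega
        rw [ih direction (rem.erase m) m hlen' hdir, hfe, hfn]
        have hfr : rem.filter (fun r => decide (pos < r)) = rem :=
          List.filter_eq_self.mpr (fun y hy => by simpa using hall y hy)
        rw [hAnil, hfr]
        have hnil : (PySem.List.sorted ([] : List Int) (fun a => a) true) = [] := rfl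
        simp [desc_cons_max rem m hmem hmax, hnil]
      · obtain ⟨m, hm⟩ : ∃ m, PySem.List.max? (rem.filter (fun r => decide (r ≤ pos))) (fun x => x) = some m := by
          cases hmm : PySem.List.max? (rem.filter (fun r => decide (r ≤ pos))) (fun x => x) with
          | none => exact absurd ((PySem.List.max?_eq_none_iff _ _).mp hmm) (fun hnil => hA (by simp [hnil]))
          | some m => exact ⟨m, rfl⟩
        have hmemA : m ∈ rem.filter (fun r => decide (r ≤ pos)) := PySem.List.max?_mem hm
        have hmem : m ∈ rem := (List.mem_filter.mp hmemA).1
        have hposm : m ≤ pos := by simpa using (List.mem_filter.mp hmemA).2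
        have hmaxA : ∀ y ∈ rem, y ≤ pos → y ≤ m := fun y hy hpy =>
          PySem.List.max?_isMax hm y (List.mem_filter.mpr ⟨hy, by simpa using hpy⟩)
        have hnxt' : clookNext direction rem pos = m := by
          rw [hnxt, if_pos (by simp [hA]), hm, Option.getD_some]
        rw [clookLoop_step direction rem pos hrem, hnxt']
        have hlen' : (rem.erase m).length ≤ n := by
          have h1 := List.length_erase_of_mem hmem
          have h2 := List.length_pos_of_mem hmem
          omega
        rw [ih direction (rem.erase m) m hlen' hdir]
        have hcong1 : ∀ x ∈ rem.erase m, (decide (x ≤ m)) = (decide (x ≤ pos)) := by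
          intro x hx
          have hxr := List.mem_of_mem_erase hx
          by_cases hp : x ≤ pos
          · simp [hp, hmaxA x hxr hp]
          · have hq : ¬ x ≤ m := by omega
            simp [hp, hq]
        have hf1 : (rem.erase m).filter (fun r => decide (r ≤ m)) =
            (rem.filter (fun r => decide (r ≤ pos))).erase m := by
          rw [List.filter_congr hcong1, filter_erase_of_pos _ _ _ (by simpa using hposm)]
        have hcong2 : ∀ x ∈ rem.erase m, (decide (m < x)) = (decide (pos < x)) := by
          intro x hx
          have hxr := List.mem_of_mem_erase hx
          by_cases hp : x ≤ pos
          · have hq := hmaxA x hxr hp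
            simp only [decide_eq_decide]
            omega
          · simp only [decide_eq_decide]
            omega
        have hf2 : (rem.erase m).filter (fun r => decide (m < r)) =
            rem.filter (fun r => decide (pos < r)) := by
          rw [List.filter_congr hcong2]
          exact filter_erase_of_neg _ _ _ (by simp only [decide_eq_false_iff_not]; omega)
        rw [hf1, hf2,
          desc_cons_max (rem.filter (fun r => decide (r ≤ pos))) m hmemA
            (fun y hy => PySem.List.max?_isMax hm y hy)]
        simp

-- splitting the one-sided sorted runs at the head value
theorem asc_split (l : List Int) (h : Int) :
    PySem.List.sorted (l.filter (fun r => decide (h ≤ r))) (fun a => a) =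
      l.filter (fun r => r == h) ++
      PySem.List.sorted (l.filter (fun r => decide (h < r))) (fun a => a) := by
  apply asc_ext
  · exact (PySem.List.sorted_perm _ _ false).trans
      ((filter_le_perm l h).trans
        (List.Perm.append_left _ (PySem.List.sorted_perm _ _ false).symm))
  · exact PySem.List.sorted_pairwise _ _
  · rw [List.pairwise_append]
    refine ⟨?_, PySem.List.sorted_pairwise _ _, ?_⟩
    · rw [List.filter_beq]
      exact List.pairwise_replicate.mpr (Or.inr le_rfl)
    · intro a ha b hb
      have ha' : a = h := by simpa using (List.mem_filter.mp ha).2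
      have hb' : h < b := by simpa using (List.mem_filter.mp ((PySem.List.mem_sorted _ _ _ _).mp hb)).2
      omega

theorem desc_split (l : List Int) (h : Int) :
    PySem.List.sorted (l.filter (fun r => decide (r ≤ h))) (fun a => a) true =
      l.filter (fun r => r == h) ++
      PySem.List.sorted (l.filter (fun r => decide (r < h))) (fun a => a) true := by
  apply desc_ext
  · exact (PySem.List.sorted_perm _ _ true).trans
      ((filter_ge_perm l h).trans
        (List.Perm.append_left _ (PySem.List.sorted_perm _ _ true).symm))
  · exact PySem.List.sorted_pairwise_rev _ _
  · rw [List.pairwise_append]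
    refine ⟨?_, PySem.List.sorted_pairwise_rev _ _, ?_⟩
    · rw [List.filter_beq]
      exact List.pairwise_replicate.mpr (Or.inr le_rfl)
    · intro a ha b hb
      have ha' : a = h := by simpa using (List.mem_filter.mp ha).2
      have hb' : b < h := by simpa using (List.mem_filter.mp ((PySem.List.mem_sorted _ _ _ _).mp hb)).2
      omega

-- reverse-sorting an already ascending-sorted list is reverse-sorting the original
theorem desc_of_asc (l : List Int) :
    PySem.List.sorted (PySem.List.sorted l (fun a => a)) (fun a => a) true =
      PySem.List.sorted l (fun a => a) true := by
  apply desc_ext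
  · exact (PySem.List.sorted_perm _ _ true).trans
      ((PySem.List.sorted_perm _ _ false).trans (PySem.List.sorted_perm _ _ true).symm)
  · exact PySem.List.sorted_pairwise_rev _ _
  · exact PySem.List.sorted_pairwise_rev _ _

-- ===== VERDICT (by name: the statement is the Claim_ definition above) =====
theorem clook_spec : Claim_equal_clook := by
  intro requests head disk_size direction _
  unfold Spec_clook clook clook_alt
  by_cases hdir : (direction == "right") = true
  · rw [if_pos hdir, loop_right requests.length direction requests head le_rfl hdir,
      asc_split requests head]
    simp
  · rw [if_neg hdir,
      loop_left requests.length direction requests head le_rfl (by simpa using hdir),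
      desc_split requests head, desc_of_asc, desc_of_asc]
    simp
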